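-- pv_equiv track=rewrite | github.com/alexeyev/kio_logs | heuristics.py | check_tp
-- ===== SOURCE A (Python) =====
-- def check_tp(code):
--     state = ""
--     for char in code:
--         if char == state:
--             return False
--         if char == "T" or char == "P":
--             state = char
--     return True
-- ===== SOURCE B (Python) =====
-- def check_tp(code):
--     sig = [c for c in code if c == "T" or c == "P"]
--     return all(a != b for a, b in zip(sig, sig[1:]))
-- ===== Notes on version B (the rewrite author's own statement) =====
-- stated objective: simpler
-- what changed: B replaces A's stateful early-return loop by a two-step decomposition: filter out the significant T/P characters, then check that no two adjacent ones are equal.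
import Mathlib
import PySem

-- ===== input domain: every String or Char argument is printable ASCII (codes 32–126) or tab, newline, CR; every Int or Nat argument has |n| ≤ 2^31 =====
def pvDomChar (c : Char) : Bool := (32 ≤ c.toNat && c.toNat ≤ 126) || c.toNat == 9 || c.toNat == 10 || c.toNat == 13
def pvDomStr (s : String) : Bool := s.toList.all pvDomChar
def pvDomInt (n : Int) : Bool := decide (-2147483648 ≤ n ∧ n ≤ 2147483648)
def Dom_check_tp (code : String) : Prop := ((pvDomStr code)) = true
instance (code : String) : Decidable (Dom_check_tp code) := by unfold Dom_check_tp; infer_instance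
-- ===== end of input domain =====

-- B decomposes A's stateful early-return loop into: filter the significant T/P chars, then check no two adjacent ones are equal (objective: simpler).

-- ===== PORT A =====
-- A's loop: state is a string ("" initially, later the last significant char as a 1-char string)
def check_tp_go : List Char → String → Bool
  | [], _ => true
  | c :: rest, state =>
      if String.ofList [c] == state then false
      else if c == 'T' || c == 'P' then check_tp_go rest (String.ofList [c])
      else check_tp_go rest state

def check_tp (code : String) : Bool := check_tp_go code.toList ""

-- ===== PORT B =====
def check_tp_alt (code : String) : Bool :=
  let sig := code.toList.filter (fun c => c == 'T' || c == 'P')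
  (sig.zip (sig.drop 1)).all (fun p => p.1 != p.2)

-- ===== PRECONDITION & SPEC =====
def Spec_check_tp (code : String) (out : Bool) : Prop := out = check_tp_alt code
instance (code : String) (out : Bool) : Decidable (Spec_check_tp code out) := by unfold Spec_check_tp; infer_instance

-- ===== CLAIM (what is proved, stated in full; the proofs are below) =====
def Claim_equal_check_tp : Prop := ∀ (code : String), Dom_check_tp code → Spec_check_tp code (check_tp code)

-- ===== LEMMAS AND PROOFS =====

-- B's adjacent-pairs check, as a function of the significant-character list
def zc (l : List Char) : Bool := (l.zip (l.drop 1)).all (fun p => p.1 != p.2)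

theorem check_tp_go_zc (cs : List Char) :
    check_tp_go cs "" = zc (cs.filter (fun c => c == 'T' || c == 'P')) ∧
    check_tp_go cs "T" = zc ('T' :: cs.filter (fun c => c == 'T' || c == 'P')) ∧
    check_tp_go cs "P" = zc ('P' :: cs.filter (fun c => c == 'T' || c == 'P')) := by
  induction cs with
  | nil => refine ⟨rfl, rfl, rfl⟩
  | cons c rest ih =>
    obtain ⟨ih0, ihT, ihP⟩ := ih
    by_cases hT : c = 'T'
    · subst hT
      refine ⟨?_, ?_, ?_⟩ <;> simp [check_tp_go, zc, ihT]
    · by_cases hP : c = 'P'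
      · subst hP
        refine ⟨?_, ?_, ?_⟩ <;> simp [check_tp_go, zc, ihP]
      · refine ⟨?_, ?_, ?_⟩ <;>
          simp [check_tp_go, String.ext_iff, hT, hP, ih0, ihT, ihP]

-- ===== VERDICT (by name: the statement is the Claim_ definition above) =====
theorem check_tp_spec : Claim_equal_check_tp := by
  intro code _
  unfold Spec_check_tp check_tp check_tp_alt
  exact (check_tp_go_zc code.toList).1
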